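-- pv_equiv track=rewrite | github.com/pushpop/Acordes | modes/microtonal_mode.py | _is_mlt
-- ===== SOURCE A (Python) =====
-- from typing import TYPE_CHECKING, List, Tuple, Optional
--
-- def _is_mlt(steps: List[int]) -> bool:
--     """Return True if the scale step pattern is a Mode of Limited Transposition.
--
--     A scale is MLT when its step pattern is periodic, meaning transposing by
--     a fraction of the octave produces the same set of pitch classes.
--     """
--     n = len(steps)
--     for period in range(1, n):
--         if n % period == 0:
--             k = n // period
--             if steps[:period] * k == steps:
--                 return True
--     return False
-- ===== SOURCE B (Python) =====
-- def _is_mlt(steps):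
--     """KMP prefix function: the minimal period is n - pi[n-1]; the pattern is
--     periodic (MLT) iff that minimal period is a proper divisor of n."""
--     n = len(steps)
--     pi = [0] * n
--     k = 0
--     for i in range(1, n):
--         while k > 0 and steps[i] != steps[k]:
--             k = pi[k - 1]
--         if steps[i] == steps[k]:
--             k += 1
--         pi[i] = k
--     if n == 0:
--         return False
--     p = n - pi[n - 1]
--     return p < n and n % p == 0
-- ===== Notes on version B (the rewrite author's own statement) =====
-- stated objective: alternative
-- what changed: B computes the KMP prefix function in one linear pass and decides MLT from the minimal period p = n - pi[n-1] (MLT iff p < n and n % p == 0), instead of testing a prefix tiling for every divisor of n.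
import Mathlib
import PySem

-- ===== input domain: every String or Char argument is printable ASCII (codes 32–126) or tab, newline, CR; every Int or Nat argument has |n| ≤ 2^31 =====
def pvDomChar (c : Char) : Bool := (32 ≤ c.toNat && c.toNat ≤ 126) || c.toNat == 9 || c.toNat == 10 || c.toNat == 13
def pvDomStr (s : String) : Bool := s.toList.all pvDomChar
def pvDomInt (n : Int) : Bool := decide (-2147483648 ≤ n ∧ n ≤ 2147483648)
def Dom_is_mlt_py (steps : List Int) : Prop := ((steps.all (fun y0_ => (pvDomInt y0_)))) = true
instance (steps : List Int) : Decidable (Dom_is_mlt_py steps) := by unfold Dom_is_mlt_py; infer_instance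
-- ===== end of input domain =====

-- B replaces A's per-divisor tiling test by a single KMP prefix-function pass:
-- the minimal period is n - pi[n-1], and the pattern is MLT iff that minimal
-- period is a proper divisor of n (objective: alternative, one linear scan).

-- ===== PORT A =====
-- early-return for-loop over range(1, n): if n % period == 0, k = n // period,
-- and steps[:period] * k == steps, return True; else continue; after the loop False.
def isMltLoopA (steps : List Int) (n : Int) : List Int → Bool
  | [] => false
  | p :: rest =>
    if PySem.Int.mod n p == 0 then
      if (List.replicate (PySem.Int.floordiv n p).toNat
            (PySem.List.slice steps none (some p))).flatten == steps then
        true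
      else isMltLoopA steps n rest
    else isMltLoopA steps n rest

def is_mlt_py (steps : List Int) : Bool :=
  let n : Int := steps.length
  isMltLoopA steps n (PySem.List.pyRange 1 n 1)

-- ===== PORT B =====
-- B's KMP inner while loop `while k > 0 and steps[i] != steps[k]: k = pi[k-1]`;
-- k strictly decreases each iteration (pi[j] ≤ j), so fuel = initial k suffices.
def kmpWhile (s : List Int) (pi : List Nat) (c : Int) : Nat → Nat → Nat
  | 0, k => k
  | fuel + 1, k =>
    if 0 < k && !(c == s.getD k 0) then kmpWhile s pi c fuel (pi.getD (k - 1) 0)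
    else k

-- B's outer loop `for i in range(1, n)` building the prefix-function table pi.
def kmpLoop (s : List Int) : List Nat → Nat → List Nat → List Nat
  | [], _, pi => pi
  | i :: rest, k, pi =>
    let c := s.getD i 0
    let k1 := kmpWhile s pi c k k
    let k2 := if c == s.getD k1 0 then k1 + 1 else k1
    kmpLoop s rest k2 (pi.set i k2)

def is_mlt_py_alt (steps : List Int) : Bool :=
  let n := steps.length
  let pi := kmpLoop steps (List.range' 1 (n - 1)) 0 (List.replicate n 0)
  if n = 0 then false
  else
    let p := n - pi.getD (n - 1) 0
    decide (p < n) && decide (n % p = 0)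

-- ===== PRECONDITION & SPEC =====
def Spec_is_mlt_py (steps : List Int) (out : Bool) : Prop := out = is_mlt_py_alt steps
instance (steps : List Int) (out : Bool) : Decidable (Spec_is_mlt_py steps out) := by unfold Spec_is_mlt_py; infer_instance

-- ===== CLAIM (what is proved, stated in full; the proofs are below) =====
def Claim_equal_is_mlt_py : Prop := ∀ (steps : List Int), Dom_is_mlt_py steps → Spec_is_mlt_py steps (is_mlt_py steps)

-- ===== LEMMAS AND PROOFS =====

-- `isBb t l`: l is a border length of t (prefix of length l equals suffix of length l)
def isBb (t : List Int) (l : Nat) : Bool := t.take l == t.drop (t.length - l)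

-- length of the longest proper border of t
def bord (t : List Int) : Nat := Nat.findGreatest (fun l => isBb t l = true) (t.length - 1)

-- candidate predicate for KMP's inner while loop at position i with char c
def pcb (s : List Int) (i : Nat) (c : Int) (l : Nat) : Bool :=
  isBb (s.take i) l && (l == 0 || s.getD l 0 == c)

def fgp (s : List Int) (i : Nat) (c : Int) (k : Nat) : Nat :=
  Nat.findGreatest (fun l => pcb s i c l = true) k

-- p is a period of s (indices taken with getD, defaults never used in range)
def PeriodN (s : List Int) (p : Nat) : Prop :=
  ∀ i, i + p < s.length → s.getD i 0 = s.getD (i + p) 0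

theorem isBb_zero (t : List Int) : isBb t 0 = true := by
  simp [isBb]

theorem bord_le (t : List Int) : bord t ≤ t.length - 1 := by
  unfold bord; exact Nat.findGreatest_le _

theorem bord_isBb (t : List Int) : isBb t (bord t) = true := by
  unfold bord; exact Nat.findGreatest_spec (P := fun l => isBb t l = true) (Nat.zero_le _) (isBb_zero t)

theorem le_bord (t : List Int) (l : Nat) (h : l ≤ t.length - 1) (hl : isBb t l = true) :
    l ≤ bord t := by
  unfold bord; exact Nat.le_findGreatest h hl

theorem isBb_take (t : List Int) (l1 l2 : Nat) (h12 : l1 ≤ l2) (hl2 : l2 ≤ t.length)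
    (h1 : isBb t l1 = true) (h2 : isBb t l2 = true) : isBb (t.take l2) l1 = true := by
  simp only [isBb, beq_iff_eq] at h1 h2 ⊢
  have hlen : (t.take l2).length = l2 := by simp [List.length_take]; omega
  rw [hlen, List.take_take, min_eq_left h12, h2, List.drop_drop]
  have he : t.length - l2 + (l2 - l1) = t.length - l1 := by omega
  rw [he, h1]

theorem isBb_of_take (t : List Int) (l1 l2 : Nat) (h12 : l1 ≤ l2) (hl2 : l2 ≤ t.length)
    (h1 : isBb (t.take l2) l1 = true) (h2 : isBb t l2 = true) : isBb t l1 = true := by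
  simp only [isBb, beq_iff_eq] at h1 h2 ⊢
  have hlen : (t.take l2).length = l2 := by simp [List.length_take]; omega
  rw [hlen] at h1
  rw [List.take_take, min_eq_left h12] at h1
  rw [h2, List.drop_drop] at h1
  have he : t.length - l2 + (l2 - l1) = t.length - l1 := by omega
  rw [he] at h1
  exact h1

theorem isBb_snoc (t : List Int) (c : Int) (l : Nat) (hl : l < t.length) :
    isBb (t ++ [c]) (l + 1) = true ↔ (isBb t l = true ∧ t.getD l 0 = c) := by
  simp only [isBb, beq_iff_eq]
  have h1 : (t ++ [c]).take (l + 1) = t.take (l + 1) :=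
    List.take_append_of_le_length (by omega)
  have h2 : (t ++ [c]).length - (l + 1) = t.length - l := by simp
  have h3 : (t ++ [c]).drop (t.length - l) = t.drop (t.length - l) ++ [c] :=
    List.drop_append_of_le_length (by omega)
  have h4 : t.take (l + 1) = t.take l ++ [t.getD l 0] := by
    rw [List.take_add_one, List.getElem?_eq_getElem hl]
    simp only [Option.toList_some, List.getD, List.getElem?_eq_getElem hl, Option.getD_some]
  rw [h1, h2, h3, h4]
  constructor
  · intro h
    have hlen : (t.take l).length = (t.drop (t.length - l)).length := by
      simp [List.length_take, List.length_drop]; omega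
    obtain ⟨he1, he2⟩ := List.append_inj h (by simpa using hlen)
    exact ⟨he1, by simpa using he2⟩
  · rintro ⟨he1, he2⟩
    rw [he1, he2]

theorem fg_eq_of_gap {P : Nat → Prop} [DecidablePred P] :
    ∀ (b m : Nat), m ≤ b → (∀ l, m < l → l ≤ b → ¬ P l) →
      Nat.findGreatest P b = Nat.findGreatest P m := by
  intro b
  induction b with
  | zero => intro m h _; interval_cases m; rfl
  | succ b ih =>
    intro m hm hgap
    rcases Nat.eq_or_lt_of_le hm with h | h
    · rw [h]
    · rw [Nat.findGreatest_succ, if_neg (hgap _ (by omega) (by omega))]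
      exact ih m (by omega) (fun l h1 h2 => hgap l h1 (by omega))

theorem getD_take (s : List Int) (i l : Nat) (h : l < i) :
    (s.take i).getD l 0 = s.getD l 0 := by
  simp [List.getD, h]

theorem kmpWhile_eq (s : List Int) (pi : List Nat) (i : Nat) (c : Int)
    (hi : i ≤ s.length)
    (Hpi : ∀ j, j < i → pi.getD j 0 = bord (s.take (j + 1))) :
    ∀ fuel k, k ≤ fuel → k < i → isBb (s.take i) k = true →
      kmpWhile s pi c fuel k = fgp s i c k := by
  intro fuel
  induction fuel with
  | zero =>
    intro k hk _ _
    have : k = 0 := by omega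
    subst this
    simp [kmpWhile, fgp]
  | succ fuel ih =>
    intro k hkf hki hkB
    rcases Nat.eq_zero_or_pos k with hk0 | hkpos
    · subst hk0; simp [kmpWhile, fgp]
    have hleni : (s.take i).length = i := by simp [List.length_take]; omega
    by_cases hc : c = s.getD k 0
    · -- loop exits; fgp = k since P k holds
      have hPk : pcb s i c k = true := by
        simp [pcb, hkB, hc]
      have h1 : fgp s i c k ≤ k := Nat.findGreatest_le _
      have h2 : k ≤ fgp s i c k := Nat.le_findGreatest le_rfl hPk
      have : kmpWhile s pi c (fuel + 1) k = k := by
        simp [kmpWhile, hc]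
      rw [this]; omega
    · -- mismatch: descend the failure chain
      have hkI : k - 1 < i := by omega
      have hHk : pi.getD (k - 1) 0 = bord (s.take k) := by
        have := Hpi (k - 1) hkI
        rwa [Nat.sub_add_cancel hkpos] at this
      set k' := pi.getD (k - 1) 0 with hk'
      have hlenk : (s.take k).length = k := by simp [List.length_take]; omega
      have hbk : k' ≤ k - 1 := by
        rw [hHk]; have := bord_le (s.take k); omega
      -- take k of take i is take k
      have htk : (s.take i).take k = s.take k := by
        rw [List.take_take, min_eq_left (by omega)]
      have hk'B : isBb (s.take i) k' = true := by
        apply isBb_of_take (s.take i) k' k (by omega) (by omega)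
        · rw [htk, hHk]; exact bord_isBb (s.take k)
        · exact hkB
      have hcond : (0 < k && !(c == s.getD k 0)) = true := by
        simp [hkpos]
        exact hc
      have hstep : kmpWhile s pi c (fuel + 1) k = kmpWhile s pi c fuel k' := by
        simp only [kmpWhile, hcond, if_true]
        rw [← hk']
      rw [hstep, ih k' (by omega) (by omega) hk'B]
      -- fgp s i c k = fgp s i c k'
      unfold fgp
      refine (fg_eq_of_gap k k' (by omega) ?_).symm
      intro l hl1 hl2 hPl
      simp only [pcb, Bool.and_eq_true, Bool.or_eq_true, beq_iff_eq] at hPl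
      obtain ⟨hB, hor⟩ := hPl
      rcases Nat.eq_or_lt_of_le hl2 with he | hlt
      · -- l = k : char must match, contradiction
        subst he
        rcases hor with h0 | hcc
        · omega
        · exact hc hcc.symm
      · -- k' < l < k : l would be a longer border of s.take k
        have hBl : isBb (s.take k) l = true := by
          have := isBb_take (s.take i) l k (by omega) (by omega) hB hkB
          rwa [htk] at this
        have : l ≤ bord (s.take k) := le_bord _ _ (by omega) hBl
        omega

theorem take_succ_getD (s : List Int) (i : Nat) (h : i < s.length) :
    s.take (i + 1) = s.take i ++ [s.getD i 0] := by
  rw [List.take_add_one, List.getElem?_eq_getElem h]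
  simp only [Option.toList_some, List.getD, List.getElem?_eq_getElem h, Option.getD_some]

theorem kmpStep_bord (s : List Int) (pi : List Nat) (i : Nat)
    (h1 : 1 ≤ i) (h2 : i < s.length)
    (Hpi : ∀ j, j < i → pi.getD j 0 = bord (s.take (j + 1))) :
    (if s.getD i 0 == s.getD (kmpWhile s pi (s.getD i 0) (bord (s.take i)) (bord (s.take i))) 0
     then kmpWhile s pi (s.getD i 0) (bord (s.take i)) (bord (s.take i)) + 1
     else kmpWhile s pi (s.getD i 0) (bord (s.take i)) (bord (s.take i))) = bord (s.take (i + 1)) := by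
  set c := s.getD i 0 with hcdef
  have hleni : (s.take i).length = i := by simp [List.length_take]; omega
  have hleni' : (s.take (i + 1)).length = i + 1 := by simp [List.length_take]; omega
  set k := bord (s.take i) with hkdef
  have hk_lt : k < i := by have := bord_le (s.take i); omega
  have hkB : isBb (s.take i) k = true := bord_isBb (s.take i)
  have hwhile := kmpWhile_eq s pi i c (by omega) Hpi k k le_rfl hk_lt hkB
  rw [hwhile]
  set m1 := fgp s i c k with hm1def
  -- properties of m1
  have hP0 : pcb s i c 0 = true := by simp [pcb, isBb_zero]
  have hPm1 : pcb s i c m1 = true := by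
    unfold fgp at hm1def
    rw [hm1def]
    exact Nat.findGreatest_spec (P := fun l => pcb s i c l = true) (Nat.zero_le _) hP0
  have hm1_le : m1 ≤ k := by unfold fgp at hm1def; rw [hm1def]; exact Nat.findGreatest_le _
  have hmax : ∀ l, l ≤ k → pcb s i c l = true → l ≤ m1 := by
    intro l hl hPl
    unfold fgp at hm1def; rw [hm1def]
    exact Nat.le_findGreatest hl hPl
  simp only [pcb, Bool.and_eq_true, Bool.or_eq_true, beq_iff_eq] at hPm1
  obtain ⟨hm1B, hm1or⟩ := hPm1
  have hsnocc : s.take (i + 1) = s.take i ++ [c] := take_succ_getD s i h2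
  -- borders of s.take (i+1) with length l+1 correspond to pcb-candidates l ≤ k
  have hbound : ∀ m, 1 ≤ m → m ≤ i → isBb (s.take (i + 1)) m = true → m - 1 ≤ m1 := by
    intro m hm1' hmi hBm
    have hml : m - 1 < i := by omega
    have hml' : m - 1 < (s.take i).length := by omega
    have : isBb (s.take i ++ [c]) (m - 1 + 1) = true := by
      rw [← hsnocc]; rwa [Nat.sub_add_cancel hm1'] 
    obtain ⟨hBm', hchar⟩ := (isBb_snoc (s.take i) c (m - 1) hml').mp this
    have hk_ge : m - 1 ≤ k := le_bord (s.take i) (m - 1) (by omega) hBm'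
    apply hmax (m - 1) hk_ge
    simp only [pcb, Bool.and_eq_true, Bool.or_eq_true, beq_iff_eq]
    refine ⟨hBm', Or.inr ?_⟩
    rw [← getD_take s i (m - 1) hml]
    exact hchar
  by_cases hc1 : c = s.getD m1 0
  · -- extend: result m1 + 1
    rw [if_pos (show (c == s.getD m1 0) = true by simpa using hc1)]
    have hm1i : m1 < (s.take i).length := by omega
    have hBext : isBb (s.take (i + 1)) (m1 + 1) = true := by
      rw [hsnocc]
      apply (isBb_snoc (s.take i) c m1 hm1i).mpr
      exact ⟨hm1B, by rw [getD_take s i m1 (by omega)]; exact hc1.symm⟩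
    have hge : m1 + 1 ≤ bord (s.take (i + 1)) :=
      le_bord (s.take (i + 1)) (m1 + 1) (by omega) hBext
    have hle' : bord (s.take (i + 1)) ≤ m1 + 1 := by
      set m := bord (s.take (i + 1)) with hmdef
      rcases Nat.eq_zero_or_pos m with h0 | hpos
      · omega
      · have hBm : isBb (s.take (i + 1)) m = true := bord_isBb _
        have hmle : m ≤ i := by have := bord_le (s.take (i + 1)); omega
        have := hbound m hpos hmle hBm
        omega
    omega
  · -- mismatch after while: m1 = 0 and s[0] ≠ c; result 0
    have hm10 : m1 = 0 := by
      rcases hm1or with h0 | hcc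
      · exact h0
      · exact absurd hcc.symm hc1
    rw [if_neg (show ¬ (c == s.getD m1 0) = true by simpa using hc1), hm10]
    symm
    by_contra hne
    have hpos : 0 < bord (s.take (i + 1)) := Nat.pos_of_ne_zero (fun h => hne h)
    set m := bord (s.take (i + 1)) with hmdef
    have hBm : isBb (s.take (i + 1)) m = true := bord_isBb _
    have hmle : m ≤ i := by have := bord_le (s.take (i + 1)); omega
    have hm1' := hbound m hpos hmle hBm
    -- so m = 1, and then s.getD 0 0 = c, contradicting hc1 with m1 = 0
    have hmeq : m = 1 := by omega
    have hml' : (0 : Nat) < (s.take i).length := by omega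
    have : isBb (s.take i ++ [c]) (0 + 1) = true := by
      rw [← hsnocc]
      simpa using hmeq ▸ hBm
    obtain ⟨_, hchar⟩ := (isBb_snoc (s.take i) c 0 hml').mp this
    rw [getD_take s i 0 (by omega)] at hchar
    rw [hm10] at hc1
    exact hc1 hchar.symm

theorem kmpLoop_correct (s : List Int) : ∀ (m i0 : Nat) (pi : List Nat) (k : Nat),
    1 ≤ i0 → i0 + m = s.length → pi.length = s.length →
    (∀ j, j < i0 → pi.getD j 0 = bord (s.take (j + 1))) →
    k = bord (s.take i0) →
    ∀ j, j < s.length → (kmpLoop s (List.range' i0 m) k pi).getD j 0 = bord (s.take (j + 1)) := by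
  intro m
  induction m with
  | zero =>
    intro i0 pi k hi0 hlen hpl Hpi hk j hj
    simp only [List.range'_zero, kmpLoop]
    exact Hpi j (by omega)
  | succ m ih =>
    intro i0 pi k hi0 hlen hpl Hpi hk j hj
    rw [List.range'_succ]
    simp only [kmpLoop]
    have hi0lt : i0 < s.length := by omega
    have hstep := kmpStep_bord s pi i0 hi0 hi0lt Hpi
    rw [← hk] at hstep
    set c := s.getD i0 0 with hcdef
    set k1 := kmpWhile s pi c k k with hk1def
    set k2 := if c == s.getD k1 0 then k1 + 1 else k1 with hk2def
    have hk2 : k2 = bord (s.take (i0 + 1)) := hstep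
    apply ih (i0 + 1) (pi.set i0 k2) k2 (by omega) (by omega) (by simp [hpl])
    · intro j' hj'
      rcases Nat.lt_or_ge j' i0 with h | h
      · rw [List.getD, List.getElem?_set_ne (by omega), ← List.getD]
        exact Hpi j' h
      · have : j' = i0 := by omega
        subst this
        rw [List.getD, List.getElem?_set_self (by omega), Option.getD_some]
        exact hk2
    · exact hk2
    · exact hj

theorem bord_take_one (s : List Int) (h : 1 ≤ s.length) : bord (s.take 1) = 0 := by
  have : (s.take 1).length = 1 := by simp [List.length_take]; omega
  unfold bord
  rw [this]
  rfl

theorem B_iff (s : List Int) (hn : 1 ≤ s.length) :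
    is_mlt_py_alt s = true ↔ (1 ≤ bord s ∧ (s.length - bord s) ∣ s.length) := by
  unfold is_mlt_py_alt
  have hpi := kmpLoop_correct s (s.length - 1) 1 (List.replicate s.length 0) 0
    le_rfl (by omega) (by simp)
    (by
      intro j hj
      have : j = 0 := by omega
      subst this
      rw [List.getD, List.getElem?_replicate_of_lt (by omega), Option.getD_some]
      exact (bord_take_one s hn).symm)
    (bord_take_one s hn).symm
    (s.length - 1) (by omega)
  rw [show s.length - 1 + 1 = s.length by omega, List.take_length] at hpi
  simp only [hpi]
  rw [if_neg (by omega)]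
  have hble := bord_le s
  simp only [Bool.and_eq_true, decide_eq_true_eq]
  constructor
  · rintro ⟨hlt, hmod⟩
    refine ⟨by omega, ?_⟩
    exact (Nat.dvd_iff_mod_eq_zero ..).mpr hmod
  · rintro ⟨hb1, hdvd⟩
    exact ⟨by omega, (Nat.dvd_iff_mod_eq_zero ..).mp hdvd⟩

theorem isBb_iff_periodN (s : List Int) (p : Nat) (hp : p ≤ s.length) :
    isBb s (s.length - p) = true ↔ PeriodN s p := by
  simp only [isBb, beq_iff_eq]
  rw [show s.length - (s.length - p) = p by omega]
  constructor
  · intro h i hi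
    have hi' : i < s.length - p := by omega
    have h1 : s.getD i 0 = (s.take (s.length - p)).getD i 0 := by
      rw [getD_take s (s.length - p) i hi']
    rw [h1, h]
    simp only [List.getD, List.getElem?_drop]
    rw [Nat.add_comm p i]
  · intro h
    apply List.ext_getElem
    · simp [List.length_take, List.length_drop]
    · intro i h1 h2
      rw [List.getElem_take, List.getElem_drop]
      have hlt : i + p < s.length := by
        simp [List.length_take] at h1
        omega
      have := h i hlt
      rw [List.getD_eq_getElem s 0 (by omega), List.getD_eq_getElem s 0 (by omega)] at this
      rw [this]
      congr 1
      omega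

theorem periodN_sub (s : List Int) (p q : Nat) (_hp : 0 < p) (hpq : p < q)
    (hsum : p + q ≤ s.length) (Hp : PeriodN s p) (Hq : PeriodN s q) :
    PeriodN s (q - p) := by
  intro i hi
  rcases Nat.lt_or_ge (i + q) s.length with hq | hq
  · have h1 := Hq i hq
    have h2 := Hp (i + (q - p)) (by omega)
    rw [show i + (q - p) + p = i + q by omega] at h2
    rw [h1, ← h2]
  · have hip : p ≤ i := by omega
    have h1 := Hp (i - p) (by omega)
    rw [show i - p + p = i by omega] at h1
    have h2 := Hq (i - p) (by omega)
    rw [show i - p + q = i + (q - p) by omega] at h2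
    rw [← h1, h2]

theorem periodN_gcd (s : List Int) : ∀ (N p q : Nat), p + q ≤ N → 0 < p → 0 < q →
    p + q ≤ s.length → PeriodN s p → PeriodN s q → PeriodN s (Nat.gcd p q) := by
  intro N
  induction N with
  | zero => intro p q h hp _ _ _ _; omega
  | succ N ih =>
    intro p q hN hp hq hlen Hp Hq
    rcases Nat.lt_trichotomy p q with h | h | h
    · have hsub := periodN_sub s p q hp h hlen Hp Hq
      have := ih p (q - p) (by omega) hp (by omega) (by omega) Hp hsub
      rwa [Nat.gcd_sub_self_right (by omega)] at this
    · rw [h, Nat.gcd_self]; exact Hq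
    · have hsub := periodN_sub s q p hq h (by omega) Hq Hp
      have := ih q (p - q) (by omega) hq (by omega) (by omega) Hq hsub
      rw [Nat.gcd_sub_self_right (by omega), Nat.gcd_comm] at this
      exact this

theorem minper (s : List Int) (r : Nat) (h1 : 1 ≤ r) (h2 : r < s.length)
    (hr : PeriodN s r) : s.length - bord s ≤ r := by
  have hB : isBb s (s.length - r) = true := (isBb_iff_periodN s r (by omega)).mpr hr
  have := le_bord s (s.length - r) (by omega) hB
  have := bord_le s
  omega

-- ===== A-side characterisation (reused structure) =====

theorem isMltLoopA_eq_any (steps : List Int) (n : Int) (l : List Int) :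
    isMltLoopA steps n l = l.any (fun p =>
      PySem.Int.mod n p == 0 &&
        ((List.replicate (PySem.Int.floordiv n p).toNat
            (PySem.List.slice steps none (some p))).flatten == steps)) := by
  induction l with
  | nil => rfl
  | cons p rest ih =>
    simp only [isMltLoopA, List.any_cons]
    split_ifs <;> simp_all

theorem take_flatten_replicate {α : Type} (t : List α) (m k : Nat) :
    ((List.replicate k t).flatten).take (m * t.length) = (List.replicate (min m k) t).flatten := by
  induction k generalizing m with
  | zero => simp
  | succ k ih =>
    cases m with
    | zero => simp
    | succ m =>
      have hmin : min (m + 1) (k + 1) = (min m k) + 1 := by omega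
      have hle : t.length ≤ (m + 1) * t.length := by nlinarith
      have hsub : (m + 1) * t.length - t.length = m * t.length := by
        have h : (m + 1) * t.length = m * t.length + t.length := by ring
        omega
      simp only [List.replicate_succ, List.flatten_cons, List.take_append, hmin]
      rw [List.take_of_length_le hle, hsub, ih]

theorem period_fwd {α : Type} (xs : List α) (p k : Nat) (_hp : 0 < p)
    (hl : xs.length = (k + 1) * p)
    (h : (List.replicate (k + 1) (xs.take p)).flatten = xs) :
    xs.drop p = xs.take (xs.length - p) := by
  have hlin : xs.length = k * p + p := by rw [hl]; ring
  have hple : p ≤ xs.length := by rw [hlin]; exact Nat.le_add_left p _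
  have htlen : (xs.take p).length = p := by
    simp [List.length_take]; omega
  have hdrop : xs.drop p = (List.replicate k (xs.take p)).flatten := by
    conv_lhs => rw [← h]
    rw [List.replicate_succ, List.flatten_cons]
    exact List.drop_left' htlen
  have hsub : xs.length - p = k * (xs.take p).length := by
    rw [htlen, hlin]; exact Nat.add_sub_cancel (k * p) p
  have htake : xs.take (xs.length - p) = (List.replicate k (xs.take p)).flatten := by
    calc xs.take (xs.length - p)
        = ((List.replicate (k + 1) (xs.take p)).flatten).take (k * (xs.take p).length) := by
          rw [h, ← hsub]
      _ = (List.replicate (min k (k + 1)) (xs.take p)).flatten := take_flatten_replicate ..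
      _ = (List.replicate k (xs.take p)).flatten := by
          rw [Nat.min_eq_left (Nat.le_succ k)]
  rw [hdrop, htake]

theorem period_bwd {α : Type} (p : Nat) (_hp : 0 < p) :
    ∀ (k : Nat) (xs : List α), xs.length = k * p →
      xs.drop p = xs.take (xs.length - p) →
      (List.replicate k (xs.take p)).flatten = xs := by
  intro k
  induction k with
  | zero =>
    intro xs hl _
    have hx : xs = [] := List.eq_nil_of_length_eq_zero (by omega)
    subst hx; simp
  | succ k ih =>
    intro xs hl h
    cases k with
    | zero =>
      have hxl : xs.length = p := by simpa using hl
      have hx : xs.take p = xs := List.take_of_length_le (by omega)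
      simp [hx]
    | succ k' =>
      have hlin : xs.length = (k' + 1) * p + p := by rw [hl]; ring
      have hpp : p ≤ xs.length - p := by
        rw [hlin, Nat.add_sub_cancel]
        have h1 : (k' + 1) * p = k' * p + p := by ring
        rw [h1]; exact Nat.le_add_left p _
      have hyslen : (xs.drop p).length = (k' + 1) * p := by
        rw [List.length_drop, hlin, Nat.add_sub_cancel]
      have hys_take : (xs.drop p).take p = xs.take p := by
        rw [h, List.take_take]
        congr 1
        omega
      have hys_shift : (xs.drop p).drop p = (xs.drop p).take ((xs.drop p).length - p) := by
        conv_lhs => rw [h]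
        rw [List.drop_take]
        congr 1
        rw [List.length_drop]
      have hys := ih (xs.drop p) hyslen hys_shift
      rw [hys_take] at hys
      rw [List.replicate_succ, List.flatten_cons, hys]
      exact List.take_append_drop p xs

theorem A_iff (s : List Int) :
    is_mlt_py s = true ↔
      ∃ pn : Nat, 1 ≤ pn ∧ pn < s.length ∧ pn ∣ s.length ∧
        s.drop pn = s.take (s.length - pn) := by
  show isMltLoopA s (s.length : Int) (PySem.List.pyRange 1 (s.length : Int) 1) = true ↔ _
  rw [isMltLoopA_eq_any, List.any_eq_true]
  constructor
  · rintro ⟨p, hmem, hcond⟩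
    obtain ⟨hp1, hp2⟩ := (PySem.List.mem_pyRange_one).mp hmem
    obtain ⟨pn, rfl⟩ : ∃ pn : Nat, p = (pn : Int) := ⟨p.toNat, (Int.toNat_of_nonneg (by omega)).symm⟩
    have h1 : 1 ≤ pn := by exact_mod_cast hp1
    have h2 : pn < s.length := by exact_mod_cast hp2
    simp only [Bool.and_eq_true, beq_iff_eq] at hcond
    obtain ⟨hmod, htile⟩ := hcond
    have hdvd : pn ∣ s.length := by
      have hd := (PySem.Int.mod_eq_zero_iff_dvd (s.length : Int) (pn : Int)).mp hmod
      exact_mod_cast hd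
    have hfd : (PySem.Int.floordiv (s.length : Int) (pn : Int)).toNat = s.length / pn := by
      rw [PySem.Int.floordiv_natCast]; exact Int.toNat_natCast _
    rw [hfd, PySem.List.slice_to_natCast] at htile
    have hdivpos : 1 ≤ s.length / pn := Nat.div_pos (Nat.le_of_dvd (by omega) hdvd) (by omega)
    obtain ⟨k', hk'⟩ : ∃ k', s.length / pn = k' + 1 := ⟨s.length / pn - 1, by omega⟩
    refine ⟨pn, h1, h2, hdvd, ?_⟩
    apply period_fwd s pn k' (by omega)
    · rw [← hk']; exact (Nat.div_mul_cancel hdvd).symm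
    · rw [← hk']; exact htile
  · rintro ⟨pn, h1, h2, hdvd, heq⟩
    refine ⟨(pn : Int), (PySem.List.mem_pyRange_one).mpr ⟨by exact_mod_cast h1, by exact_mod_cast h2⟩, ?_⟩
    simp only [Bool.and_eq_true, beq_iff_eq]
    constructor
    · exact (PySem.Int.mod_eq_zero_iff_dvd (s.length : Int) (pn : Int)).mpr (by exact_mod_cast hdvd)
    · rw [PySem.Int.floordiv_natCast, Int.toNat_natCast, PySem.List.slice_to_natCast]
      exact period_bwd pn (by omega) (s.length / pn) s (Nat.div_mul_cancel hdvd).symm heq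

theorem main_eq (s : List Int) : is_mlt_py s = is_mlt_py_alt s := by
  rcases Nat.eq_zero_or_pos s.length with h0 | hpos
  · have hnil : s = [] := List.eq_nil_of_length_eq_zero h0
    subst hnil
    decide
  · rw [Bool.eq_iff_iff, A_iff, B_iff s hpos]
    constructor
    · rintro ⟨p, h1, h2, hdvd, heq⟩
      have hBp : isBb s (s.length - p) = true := by
        simp only [isBb, beq_iff_eq]
        rw [show s.length - (s.length - p) = p by omega]
        exact heq.symm
      have hbord_ge : s.length - p ≤ bord s := le_bord s _ (by omega) hBp
      have hble := bord_le s
      refine ⟨by omega, ?_⟩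
      set q0 := s.length - bord s with hq0
      have hq0pos : 1 ≤ q0 := by omega
      have hPq0 : PeriodN s q0 := by
        have hb : isBb s (s.length - q0) = true := by
          rw [show s.length - q0 = bord s by omega]; exact bord_isBb s
        exact (isBb_iff_periodN s q0 (by omega)).mp hb
      have hPp : PeriodN s p := (isBb_iff_periodN s p (by omega)).mp hBp
      have hq0le : q0 ≤ p := minper s p h1 h2 hPp
      have h2p : 2 * p ≤ s.length := by
        obtain ⟨m, hm⟩ := hdvd
        have hm2 : 2 ≤ m := by
          rcases m with _ | _ | m <;> omega
        have := Nat.mul_le_mul_left p hm2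
        omega
      have hg := periodN_gcd s (q0 + p) q0 p le_rfl (by omega) (by omega) (by omega) hPq0 hPp
      have hgpos : 0 < Nat.gcd q0 p := Nat.gcd_pos_of_pos_left p (by omega)
      have hgle : Nat.gcd q0 p ≤ q0 := Nat.le_of_dvd (by omega) (Nat.gcd_dvd_left q0 p)
      have hmin2 : q0 ≤ Nat.gcd q0 p := minper s _ (by omega) (by omega) hg
      have hgeq : Nat.gcd q0 p = q0 := by omega
      have hdq : q0 ∣ p := hgeq ▸ Nat.gcd_dvd_right q0 p
      exact hdq.trans hdvd
    · rintro ⟨hb1, hdvd⟩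
      have hble := bord_le s
      refine ⟨s.length - bord s, by omega, by omega, hdvd, ?_⟩
      have hB := bord_isBb s
      simp only [isBb, beq_iff_eq] at hB
      rw [show s.length - (s.length - bord s) = bord s by omega]
      exact hB.symm

-- ===== VERDICT (by name: the statement is the Claim_ definition above) =====
theorem is_mlt_py_spec : Claim_equal_is_mlt_py := by
  intro steps _
  unfold Spec_is_mlt_py
  exact main_eq steps
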